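-- pv_equiv track=rewrite | github.com/YunaGuo0909/GenAI_test_03-04-26 | model2_text_gen/generate.py | parse_species_text
-- ===== SOURCE A (Python) =====
-- def parse_species_text(text: str) -> dict:
--     """Parse a generated species entry into structured fields."""
--     result = {
--         "raw": text,
--         "common_name": "",
--         "scientific_name": "",
--         "phylum": "",
--         "class": "",
--         "order": "",
--         "family": "",
--         "habitat": "",
--         "conservation": "",
--         "description": "",
--     }
--
--     field_map = {
--         "Common Name:": "common_name",
--         "Scientific Name:": "scientific_name",
--         "Phylum:": "phylum",
--         "Class:": "class",
--         "Order:": "order",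
--         "Family:": "family",
--         "Habitat:": "habitat",
--         "Conservation Status:": "conservation",
--     }
--
--     for line in text.split("\n"):
--         line = line.strip()
--         for prefix, key in field_map.items():
--             if line.startswith(prefix):
--                 result[key] = line[len(prefix):].strip()
--                 break
--
--     if "---" in text:
--         desc_part = text.split("---", 1)[1]
--         desc_part = desc_part.replace("</SPECIES>", "").strip()
--         result["description"] = desc_part
--
--     # Backward compat: also expose as "name"
--     result["name"] = result["common_name"]
--
--     return result
-- ===== SOURCE B (Python) =====
-- def parse_species_text(text: str) -> dict:
--     """Parse a generated species entry into structured fields.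
--
--     Field-major: for each field label, scan the stripped lines from the end and
--     take the last line carrying that label (later lines win, matching overwrite
--     semantics); the output dict is then built in one literal expression.
--     """
--     lines = [ln.strip() for ln in text.split("\n")]
--
--     def last_value(prefix):
--         for ln in reversed(lines):
--             if ln.startswith(prefix):
--                 return ln[len(prefix):].strip()
--         return ""
--
--     description = ""
--     if "---" in text:
--         description = text.split("---", 1)[1].replace("</SPECIES>", "").strip()
--
--     result = {
--         "raw": text,
--         "common_name": last_value("Common Name:"),
--         "scientific_name": last_value("Scientific Name:"),
--         "phylum": last_value("Phylum:"),
--         "class": last_value("Class:"),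
--         "order": last_value("Order:"),
--         "family": last_value("Family:"),
--         "habitat": last_value("Habitat:"),
--         "conservation": last_value("Conservation Status:"),
--         "description": description,
--     }
--     result["name"] = result["common_name"]
--     return result
-- ===== Notes on version B (the rewrite author's own statement) =====
-- stated objective: alternative
-- what changed: Inverts the loop nesting: instead of a line-major pass mutating a fields dict (inner prefix scan + overwrite), B is field-major: for each of the eight labels it scans the stripped lines in reverse and takes the first (i.e. last) matching line, then builds the output dict in one literal expression; last-match-wins replaces dict overwrite.
import Mathlib
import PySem

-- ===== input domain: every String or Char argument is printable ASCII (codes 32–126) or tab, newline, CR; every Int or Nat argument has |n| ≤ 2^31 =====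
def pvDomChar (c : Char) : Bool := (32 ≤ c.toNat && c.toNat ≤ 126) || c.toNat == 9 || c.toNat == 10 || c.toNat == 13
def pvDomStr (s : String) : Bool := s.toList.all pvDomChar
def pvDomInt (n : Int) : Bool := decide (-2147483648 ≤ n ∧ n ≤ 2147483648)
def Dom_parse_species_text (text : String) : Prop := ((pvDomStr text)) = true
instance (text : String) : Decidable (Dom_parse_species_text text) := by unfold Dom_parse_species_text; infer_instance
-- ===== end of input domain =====

-- B inverts the loop nesting: instead of A's line-major pass mutating a fields dict, B goes
-- field-major — for each label it takes the last matching stripped line (a reverse scan) and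
-- builds the output dict in one literal expression (objective: alternative).

-- ===== PORT A =====
def pvFieldMapA : List (String × String) :=
  [("Common Name:", "common_name"), ("Scientific Name:", "scientific_name"),
   ("Phylum:", "phylum"), ("Class:", "class"), ("Order:", "order"),
   ("Family:", "family"), ("Habitat:", "habitat"), ("Conservation Status:", "conservation")]

-- the inner `for prefix, key in field_map.items(): ... break` scan of A
def pvScanA (line : String) (result : PySem.Dict String String) :
    List (String × String) → PySem.Dict String String
  | [] => result
  | (pre, key) :: rest =>
      if PySem.Str.startswith line pre then
        result.insert key (PySem.Str.strip (PySem.Str.slice line (some (PySem.Str.len pre)) none))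
      else pvScanA line result rest

def parse_species_text (text : String) : List (String × String) :=
  let result0 : PySem.Dict String String := PySem.Dict.mk
    [("raw", text), ("common_name", ""), ("scientific_name", ""), ("phylum", ""),
     ("class", ""), ("order", ""), ("family", ""), ("habitat", ""),
     ("conservation", ""), ("description", "")]
  let lines := (PySem.Str.split? text "\n").getD []   -- sep "\n" is nonempty, split? is always some
  let result := lines.foldl (fun r line => pvScanA (PySem.Str.strip line) r pvFieldMapA) result0
  let result :=
    if PySem.Str.isIn "---" text then
      let parts := (PySem.Str.splitMax? text "---" 1).getD []
      -- "---" occurs in text, so the split has a piece at index 1: Python's parts[1] cannot raise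
      let descPart := (PySem.List.pyGet? parts 1).getD ""
      result.insert "description" (PySem.Str.strip (PySem.Str.replace descPart "</SPECIES>" ""))
    else result
  -- result["name"] = result["common_name"]: the key is always present, Python's d[k] cannot raise
  (result.insert "name" (result.getD "common_name" "")).items

-- ===== PORT B =====
-- Source B's `last_value`: first match over reversed(lines), i.e. the last matching line
def pvLastValue (lines : List String) (pre : String) : String :=
  match lines.reverse.find? (fun ln => PySem.Str.startswith ln pre) with
  | some ln => PySem.Str.strip (PySem.Str.slice ln (some (PySem.Str.len pre)) none)
  | none => ""

def parse_species_text_alt (text : String) : List (String × String) :=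
  let lines := ((PySem.Str.split? text "\n").getD []).map PySem.Str.strip
  let description :=
    if PySem.Str.isIn "---" text then
      PySem.Str.strip (PySem.Str.replace
        ((PySem.List.pyGet? ((PySem.Str.splitMax? text "---" 1).getD []) 1).getD "")
        "</SPECIES>" "")
    else ""
  let result : PySem.Dict String String := PySem.Dict.mk
    [("raw", text),
     ("common_name", pvLastValue lines "Common Name:"),
     ("scientific_name", pvLastValue lines "Scientific Name:"),
     ("phylum", pvLastValue lines "Phylum:"),
     ("class", pvLastValue lines "Class:"),
     ("order", pvLastValue lines "Order:"),
     ("family", pvLastValue lines "Family:"),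
     ("habitat", pvLastValue lines "Habitat:"),
     ("conservation", pvLastValue lines "Conservation Status:"),
     ("description", description)]
  (result.insert "name" (result.getD "common_name" "")).items

-- ===== PRECONDITION & SPEC =====
def Spec_parse_species_text (text : String) (out : List (String × String)) : Prop := out = parse_species_text_alt text
instance (text : String) (out : List (String × String)) : Decidable (Spec_parse_species_text text out) := by unfold Spec_parse_species_text; infer_instance

-- ===== CLAIM (what is proved, stated in full; the proofs are below) =====
def Claim_equal_parse_species_text : Prop := ∀ (text : String), Dom_parse_species_text text → Spec_parse_species_text text (parse_species_text text)

-- ===== LEMMAS AND PROOFS =====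

-- A's fold state, with the ten values explicit
def pvState (t cn sn ph cl od fa ha co d : String) : PySem.Dict String String :=
  PySem.Dict.mk
    [("raw", t), ("common_name", cn), ("scientific_name", sn), ("phylum", ph),
     ("class", cl), ("order", od), ("family", fa), ("habitat", ha),
     ("conservation", co), ("description", d)]

def pvVal (l pre : String) : String :=
  PySem.Str.strip (PySem.Str.slice l (some (PySem.Str.len pre)) none)

-- generalisation of pvLastValue with an explicit default (the value carried in before this suffix)
def pvLast (L : List String) (pre init : String) : String :=
  match L.reverse.find? (fun ln => PySem.Str.startswith ln pre) with
  | some ln => pvVal ln pre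
  | none => init

lemma pvLast_nil (pre init : String) : pvLast [] pre init = init := rfl

lemma pvLast_cons (hd : String) (tl : List String) (pre init : String) :
    pvLast (hd :: tl) pre init
      = pvLast tl pre (if PySem.Str.startswith hd pre then pvVal hd pre else init) := by
  unfold pvLast
  rw [List.reverse_cons, List.find?_append]
  cases h : tl.reverse.find? (fun ln => PySem.Str.startswith ln pre) with
  | some ln => rfl
  | none =>
      rw [Option.none_or]
      by_cases hs : PySem.Str.startswith hd pre = true
      · have hf : List.find? (fun ln => PySem.Str.startswith ln pre) [hd] = some hd := by
          simp only [List.find?, hs]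
        rw [hf, if_pos hs]
      · have hs' : PySem.Str.startswith hd pre = false := Bool.eq_false_iff.mpr hs
        have hf : List.find? (fun ln => PySem.Str.startswith ln pre) [hd] = none := by
          simp only [List.find?, hs']
        rw [hf, if_neg hs]

-- two incomparable prefixes cannot both start the same line
lemma pv_excl {l : String} (p q : String) (h : PySem.Str.startswith l p = true)
    (hincomp : ¬ p.toList <+: q.toList ∧ ¬ q.toList <+: p.toList) :
    PySem.Str.startswith l q = false := by
  rw [PySem.Str.startswith_eq] at h ⊢
  rw [PySem.Chars.startswith_iff] at h
  rw [Bool.eq_false_iff]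
  intro hq
  rw [PySem.Chars.startswith_iff] at hq
  rcases List.prefix_or_prefix_of_prefix h hq with hc | hc
  · exact hincomp.1 hc
  · exact hincomp.2 hc

-- one step of A's scan, expressed on the explicit state
lemma pv_step (l t cn sn ph cl od fa ha co d : String) :
    pvScanA l (pvState t cn sn ph cl od fa ha co d) pvFieldMapA
      = if PySem.Str.startswith l "Common Name:" then
          pvState t (pvVal l "Common Name:") sn ph cl od fa ha co d
        else if PySem.Str.startswith l "Scientific Name:" then
          pvState t cn (pvVal l "Scientific Name:") ph cl od fa ha co d
        else if PySem.Str.startswith l "Phylum:" then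
          pvState t cn sn (pvVal l "Phylum:") cl od fa ha co d
        else if PySem.Str.startswith l "Class:" then
          pvState t cn sn ph (pvVal l "Class:") od fa ha co d
        else if PySem.Str.startswith l "Order:" then
          pvState t cn sn ph cl (pvVal l "Order:") fa ha co d
        else if PySem.Str.startswith l "Family:" then
          pvState t cn sn ph cl od (pvVal l "Family:") ha co d
        else if PySem.Str.startswith l "Habitat:" then
          pvState t cn sn ph cl od fa (pvVal l "Habitat:") co d
        else if PySem.Str.startswith l "Conservation Status:" then
          pvState t cn sn ph cl od fa ha (pvVal l "Conservation Status:") d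
        else pvState t cn sn ph cl od fa ha co d := by
  simp only [pvScanA, pvFieldMapA]
  split_ifs <;> rfl

-- A's fold over the stripped lines, solved componentwise: last match wins
lemma pv_fold (L : List String) (t cn sn ph cl od fa ha co d : String) :
    L.foldl (fun r l => pvScanA l r pvFieldMapA) (pvState t cn sn ph cl od fa ha co d)
      = pvState t (pvLast L "Common Name:" cn) (pvLast L "Scientific Name:" sn)
          (pvLast L "Phylum:" ph) (pvLast L "Class:" cl) (pvLast L "Order:" od)
          (pvLast L "Family:" fa) (pvLast L "Habitat:" ha)
          (pvLast L "Conservation Status:" co) d := by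
  induction L generalizing cn sn ph cl od fa ha co with
  | nil => simp [pvLast_nil]
  | cons hd tl ih =>
      rw [List.foldl_cons, pv_step]
      simp only [pvLast_cons]
      by_cases h1 : PySem.Str.startswith hd "Common Name:" = true
      · have e2 := pv_excl "Common Name:" "Scientific Name:" h1 ⟨by decide, by decide⟩
        have e3 := pv_excl "Common Name:" "Phylum:" h1 ⟨by decide, by decide⟩
        have e4 := pv_excl "Common Name:" "Class:" h1 ⟨by decide, by decide⟩
        have e5 := pv_excl "Common Name:" "Order:" h1 ⟨by decide, by decide⟩
        have e6 := pv_excl "Common Name:" "Family:" h1 ⟨by decide, by decide⟩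
        have e7 := pv_excl "Common Name:" "Habitat:" h1 ⟨by decide, by decide⟩
        have e8 := pv_excl "Common Name:" "Conservation Status:" h1 ⟨by decide, by decide⟩
        rw [if_pos h1, ih]
        simp only [h1, e2, e3, e4, e5, e6, e7, e8]; simp
      · rw [if_neg h1]
        by_cases h2 : PySem.Str.startswith hd "Scientific Name:" = true
        · have e3 := pv_excl "Scientific Name:" "Phylum:" h2 ⟨by decide, by decide⟩
          have e4 := pv_excl "Scientific Name:" "Class:" h2 ⟨by decide, by decide⟩
          have e5 := pv_excl "Scientific Name:" "Order:" h2 ⟨by decide, by decide⟩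
          have e6 := pv_excl "Scientific Name:" "Family:" h2 ⟨by decide, by decide⟩
          have e7 := pv_excl "Scientific Name:" "Habitat:" h2 ⟨by decide, by decide⟩
          have e8 := pv_excl "Scientific Name:" "Conservation Status:" h2 ⟨by decide, by decide⟩
          rw [if_pos h2, ih]
          simp only [h1, h2, e3, e4, e5, e6, e7, e8]; simp
        · rw [if_neg h2]
          by_cases h3 : PySem.Str.startswith hd "Phylum:" = true
          · have e4 := pv_excl "Phylum:" "Class:" h3 ⟨by decide, by decide⟩
            have e5 := pv_excl "Phylum:" "Order:" h3 ⟨by decide, by decide⟩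
            have e6 := pv_excl "Phylum:" "Family:" h3 ⟨by decide, by decide⟩
            have e7 := pv_excl "Phylum:" "Habitat:" h3 ⟨by decide, by decide⟩
            have e8 := pv_excl "Phylum:" "Conservation Status:" h3 ⟨by decide, by decide⟩
            rw [if_pos h3, ih]
            simp only [h1, h2, h3, e4, e5, e6, e7, e8]; simp
          · rw [if_neg h3]
            by_cases h4 : PySem.Str.startswith hd "Class:" = true
            · have e5 := pv_excl "Class:" "Order:" h4 ⟨by decide, by decide⟩
              have e6 := pv_excl "Class:" "Family:" h4 ⟨by decide, by decide⟩
              have e7 := pv_excl "Class:" "Habitat:" h4 ⟨by decide, by decide⟩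
              have e8 := pv_excl "Class:" "Conservation Status:" h4 ⟨by decide, by decide⟩
              rw [if_pos h4, ih]
              simp only [h1, h2, h3, h4, e5, e6, e7, e8]; simp
            · rw [if_neg h4]
              by_cases h5 : PySem.Str.startswith hd "Order:" = true
              · have e6 := pv_excl "Order:" "Family:" h5 ⟨by decide, by decide⟩
                have e7 := pv_excl "Order:" "Habitat:" h5 ⟨by decide, by decide⟩
                have e8 := pv_excl "Order:" "Conservation Status:" h5 ⟨by decide, by decide⟩
                rw [if_pos h5, ih]
                simp only [h1, h2, h3, h4, h5, e6, e7, e8]; simp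
              · rw [if_neg h5]
                by_cases h6 : PySem.Str.startswith hd "Family:" = true
                · have e7 := pv_excl "Family:" "Habitat:" h6 ⟨by decide, by decide⟩
                  have e8 := pv_excl "Family:" "Conservation Status:" h6 ⟨by decide, by decide⟩
                  rw [if_pos h6, ih]
                  simp only [h1, h2, h3, h4, h5, h6, e7, e8]; simp
                · rw [if_neg h6]
                  by_cases h7 : PySem.Str.startswith hd "Habitat:" = true
                  · have e8 := pv_excl "Habitat:" "Conservation Status:" h7 ⟨by decide, by decide⟩
                    rw [if_pos h7, ih]
                    simp only [h1, h2, h3, h4, h5, h6, h7, e8]; simp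
                  · rw [if_neg h7]
                    by_cases h8 : PySem.Str.startswith hd "Conservation Status:" = true
                    · rw [if_pos h8, ih]
                      simp only [h1, h2, h3, h4, h5, h6, h7, h8]; simp
                    · rw [if_neg h8, ih]
                      simp only [h1, h2, h3, h4, h5, h6, h7, h8]; simp

-- A strips each line inside its fold; B strips all lines first: same fold
lemma pv_foldl_strip (L : List String) (st : PySem.Dict String String) :
    L.foldl (fun r line => pvScanA (PySem.Str.strip line) r pvFieldMapA) st
      = (L.map PySem.Str.strip).foldl (fun r l => pvScanA l r pvFieldMapA) st := by
  rw [List.foldl_map]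

-- inserting the description into the explicit state just replaces its component
lemma pv_insert_desc (t cn sn ph cl od fa ha co d D : String) :
    (pvState t cn sn ph cl od fa ha co d).insert "description" D
      = pvState t cn sn ph cl od fa ha co D := by
  apply PySem.Dict.ext
  simp [pvState, PySem.Dict.items_insert]

lemma pv_getD_cn (t cn sn ph cl od fa ha co d : String) :
    (pvState t cn sn ph cl od fa ha co d).getD "common_name" "" = cn := by
  simp [pvState, PySem.Dict.getD_eq_get?_getD, PySem.Dict.get?_mk_cons]

-- final assembly on the explicit state: getD "common_name" and the "name" append
lemma pv_assemble (t cn sn ph cl od fa ha co d : String) :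
    ((pvState t cn sn ph cl od fa ha co d).insert "name"
        ((pvState t cn sn ph cl od fa ha co d).getD "common_name" "")).items
      = [("raw", t), ("common_name", cn), ("scientific_name", sn), ("phylum", ph),
         ("class", cl), ("order", od), ("family", fa), ("habitat", ha),
         ("conservation", co), ("description", d), ("name", cn)] := by
  rw [pv_getD_cn]
  simp [pvState, PySem.Dict.items_insert]

-- the same assembly step, phrased on B's literal dict (definitionally pvState)
lemma pv_assembleB (t cn sn ph cl od fa ha co d : String) :
    ((PySem.Dict.mk
        [("raw", t), ("common_name", cn), ("scientific_name", sn), ("phylum", ph),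
         ("class", cl), ("order", od), ("family", fa), ("habitat", ha),
         ("conservation", co), ("description", d)] : PySem.Dict String String).insert "name"
        ((PySem.Dict.mk
        [("raw", t), ("common_name", cn), ("scientific_name", sn), ("phylum", ph),
         ("class", cl), ("order", od), ("family", fa), ("habitat", ha),
         ("conservation", co), ("description", d)] : PySem.Dict String String).getD "common_name" "")).items
      = [("raw", t), ("common_name", cn), ("scientific_name", sn), ("phylum", ph),
         ("class", cl), ("order", od), ("family", fa), ("habitat", ha),
         ("conservation", co), ("description", d), ("name", cn)] :=
  pv_assemble t cn sn ph cl od fa ha co d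

lemma pvLastValue_eq (L : List String) (pre : String) :
    pvLastValue L pre = pvLast L pre "" := rfl

-- ===== VERDICT (by name: the statement is the Claim_ definition above) =====
theorem parse_species_text_spec : Claim_equal_parse_species_text := by
  intro text _
  unfold Spec_parse_species_text parse_species_text parse_species_text_alt
  simp only [pvLastValue_eq]
  set lines := (PySem.Str.split? text "\n").getD [] with hlines
  have hfold :
      lines.foldl (fun r line => pvScanA (PySem.Str.strip line) r pvFieldMapA)
        (pvState text "" "" "" "" "" "" "" "" "")
        = pvState text (pvLast (lines.map PySem.Str.strip) "Common Name:" "")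
            (pvLast (lines.map PySem.Str.strip) "Scientific Name:" "")
            (pvLast (lines.map PySem.Str.strip) "Phylum:" "")
            (pvLast (lines.map PySem.Str.strip) "Class:" "")
            (pvLast (lines.map PySem.Str.strip) "Order:" "")
            (pvLast (lines.map PySem.Str.strip) "Family:" "")
            (pvLast (lines.map PySem.Str.strip) "Habitat:" "")
            (pvLast (lines.map PySem.Str.strip) "Conservation Status:" "") "" := by
    rw [pv_foldl_strip]
    exact pv_fold (lines.map PySem.Str.strip) text "" "" "" "" "" "" "" "" ""
  rw [show (PySem.Dict.mk
      [("raw", text), ("common_name", ""), ("scientific_name", ""), ("phylum", ""),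
       ("class", ""), ("order", ""), ("family", ""), ("habitat", ""),
       ("conservation", ""), ("description", "")] : PySem.Dict String String)
      = pvState text "" "" "" "" "" "" "" "" "" from rfl]
  rw [hfold]
  by_cases hdash : PySem.Str.isIn "---" text = true
  · rw [if_pos hdash, if_pos hdash, pv_insert_desc, pv_assemble, pv_assembleB]
  · rw [if_neg hdash, if_neg hdash, pv_assemble, pv_assembleB]
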